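-- pv_equiv track=rewrite | github.com/mrvoh/LASERWordEmbedder | src/utils.py | words2fragments
-- ===== SOURCE A (Python) =====
-- def words2fragments(dataset, encoded_sentences):
--     mapping = []
--
--     for sentence_index in range(len(dataset)):
--         sentence_mapping = []
--         fragment_counter = 0
--
--         for word in dataset[sentence_index]:
--             word_mapping = word
--             w = word_mapping[0]
--             fragments = encoded_sentences[sentence_index].split()
--             checked_fragments = []
--
--             for fr in range(len(fragments)):
--                 for sc in [".", ",", "!", "?"]:
--                     if sc in fragments[fr]:
--                         checked_fragments.append(fragments[fr][:fragments[fr].find(sc)])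
--                         checked_fragments.append(fragments[fr][fragments[fr].find(sc):])
--
--                     else:
--                         checked_fragments.append(fragments[fr])
--
--                     break
--
--             fragments = checked_fragments
--
--             fragments_for_word = []
--
--             for f in range(fragment_counter, len(fragments)):
--                 fragments_for_word.append(fragments[f])
--                 fragment_counter += 1
--
--                 if w[-len(fragments[f]):] == fragments[f]:
--                     break
--
--             word_mapping += fragments_for_word
--             sentence_mapping.append(word_mapping)
--
--         mapping.append(sentence_mapping)
--
--     return mapping
-- ===== SOURCE B (Python) =====
-- def words2fragments(dataset, encoded_sentences):
--     # Single pass per sentence: split fragments once, then feed them to the words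
--     # with a moving word pointer. Extends each word list in place, like the original.
--     mapping = []
--     for i, sentence in enumerate(dataset):
--         if sentence:
--             frags = []
--             for tok in encoded_sentences[i].split():
--                 j = tok.find('.')
--                 if j >= 0:
--                     frags.append(tok[:j])
--                     frags.append(tok[j:])
--                 else:
--                     frags.append(tok)
--             k = 0
--             for fr in frags:
--                 if k >= len(sentence):
--                     break
--                 word = sentence[k]
--                 word.append(fr)
--                 if word[0][-len(fr):] == fr:
--                     k += 1
--         mapping.append(list(sentence))
--     return mapping
-- ===== Notes on version B (the rewrite author's own statement) =====
-- stated objective: alternative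
-- what changed: A re-splits the encoded sentence and rebuilds the checked fragment list for every word and scans fragments by a counter; B splits once per sentence and makes a single pass over the fragment list with a moving word pointer, appending each fragment to the current word and advancing on a suffix match.
import Mathlib
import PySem

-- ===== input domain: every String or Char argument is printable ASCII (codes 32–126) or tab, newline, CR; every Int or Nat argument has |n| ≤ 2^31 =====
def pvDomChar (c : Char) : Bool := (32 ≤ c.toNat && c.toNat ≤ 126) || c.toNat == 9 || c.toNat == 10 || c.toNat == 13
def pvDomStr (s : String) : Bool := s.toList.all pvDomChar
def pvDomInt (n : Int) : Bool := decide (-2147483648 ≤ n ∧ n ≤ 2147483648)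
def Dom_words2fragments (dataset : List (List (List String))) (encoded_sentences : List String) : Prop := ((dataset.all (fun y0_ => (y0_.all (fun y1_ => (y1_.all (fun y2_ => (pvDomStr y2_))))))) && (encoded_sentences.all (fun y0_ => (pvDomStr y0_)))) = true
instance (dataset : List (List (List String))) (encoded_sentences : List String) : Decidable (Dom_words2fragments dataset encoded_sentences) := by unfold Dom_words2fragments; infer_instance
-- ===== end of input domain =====

-- B replaces A's per-word recomputation of the fragment list by one split per sentence and a
-- single pass over the fragments with a moving word pointer (objective: alternative decomposition).
-- Both Pythons extend the input word lists in place identically; the theorems are about the return value.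

-- ===== PORT A =====
-- inner `for sc in [".", ",", "!", "?"]: …; break` — only the first element is ever processed
def scLoopA (checked : List String) (frag : String) : List String → List String
  | [] => checked
  | sc :: _ =>
    if PySem.Str.isIn sc frag then
      checked ++ [PySem.Str.slice frag none (some (PySem.Str.find frag sc)),
                  PySem.Str.slice frag (some (PySem.Str.find frag sc)) none]
    else checked ++ [frag]

def checkedFragsA (fragments : List String) : List String :=
  fragments.foldl (fun checked frag => scLoopA checked frag [".", ",", "!", "?"]) []

-- `for f in range(fragment_counter, len(fragments)): … break` with its counter
def consumeA (fragments : List String) (w : String) (f : Nat) : List String × Nat :=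
  if h : f < fragments.length then
    if PySem.Str.slice w (some (-(PySem.Str.len fragments[f] : Int))) none == fragments[f] then
      ([fragments[f]], f + 1)
    else
      (fragments[f] :: (consumeA fragments w (f + 1)).1, (consumeA fragments w (f + 1)).2)
  else ([], f)
termination_by fragments.length - f

-- `for word in dataset[sentence_index]`; word[0] raises on an empty word (excluded by Pre_)
def wordsLoopA (enc : String) : List (List String) → Nat → List (List String)
  | [], _ => []
  | word :: rest, counter =>
    (word ++ (consumeA (checkedFragsA (PySem.Str.split₀ enc)) (word.headD "") counter).1)
      :: wordsLoopA enc rest (consumeA (checkedFragsA (PySem.Str.split₀ enc)) (word.headD "") counter).2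

-- `for sentence_index in range(len(dataset))`; encoded_sentences[i] is only read when the
-- sentence has a word (Pre_ guarantees the index is then in range; the getD default is never used there)
def sentLoopA (encoded : List String) : List (List (List String)) → Nat → List (List (List String))
  | [], _ => []
  | sentence :: rest, i =>
    wordsLoopA (encoded.getD i "") sentence 0 :: sentLoopA encoded rest (i + 1)

def words2fragments (dataset : List (List (List String))) (encoded_sentences : List String) : List (List (List String)) :=
  sentLoopA encoded_sentences dataset 0

-- ===== PORT B =====
def fragsB (toks : List String) : List String :=
  toks.foldl (fun acc tok =>
    let j := PySem.Str.find tok "."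
    if 0 ≤ j then
      acc ++ [PySem.Str.slice tok none (some j), PySem.Str.slice tok (some j) none]
    else acc ++ [tok]) []

-- `for fr in frags: if k >= len(sentence): break; …` — word k gets fr appended, k advances on a suffix match
def feedB : List (List String) → Nat → List String → List (List String)
  | ws, _, [] => ws
  | ws, k, fr :: rest =>
    if h : k < ws.length then
      if PySem.Str.slice ((ws[k] ++ [fr]).headD "") (some (-(PySem.Str.len fr : Int))) none == fr then
        feedB (ws.set k (ws[k] ++ [fr])) (k + 1) rest
      else
        feedB (ws.set k (ws[k] ++ [fr])) k rest
    else ws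

def words2fragments_alt (dataset : List (List (List String))) (encoded_sentences : List String) : List (List (List String)) :=
  dataset.zipIdx.map (fun p =>
    if p.1.isEmpty then p.1
    else feedB p.1 0 (fragsB (PySem.Str.split₀ (encoded_sentences.getD p.2 ""))))

-- ===== PRECONDITION & SPEC =====
-- Pre_ excludes exactly the inputs where A raises: an empty word list (word[0] → IndexError),
-- or a non-empty sentence whose index is out of range of encoded_sentences (IndexError).
def Pre_words2fragments (dataset : List (List (List String))) (encoded_sentences : List String) : Prop :=
  (∀ s ∈ dataset, ∀ w ∈ s, w ≠ []) ∧
  (∀ p ∈ dataset.zipIdx, p.1 ≠ [] → p.2 < encoded_sentences.length)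
instance (dataset : List (List (List String))) (encoded_sentences : List String) : Decidable (Pre_words2fragments dataset encoded_sentences) := by unfold Pre_words2fragments; infer_instance

def pvWitness_words2fragments : List (List (List String)) × List String :=
  ([[["hi", "x"], ["there."]], []], ["hi the. re", "unused"])

def Spec_words2fragments (dataset : List (List (List String))) (encoded_sentences : List String) (out : List (List (List String))) : Prop := out = words2fragments_alt dataset encoded_sentences
instance (dataset : List (List (List String))) (encoded_sentences : List String) (out : List (List (List String))) : Decidable (Spec_words2fragments dataset encoded_sentences out) := by unfold Spec_words2fragments; infer_instance

-- ===== CLAIM (what is proved, stated in full; the proofs are below) =====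
def Claim_equal_words2fragments : Prop := ∀ (dataset : List (List (List String))) (encoded_sentences : List String), Dom_words2fragments dataset encoded_sentences → Pre_words2fragments dataset encoded_sentences → Spec_words2fragments dataset encoded_sentences (words2fragments dataset encoded_sentences)

-- ===== LEMMAS AND PROOFS =====

-- the two per-token fragment splitters agree
lemma checkedFrags_eq_fragsB (toks : List String) : checkedFragsA toks = fragsB toks := by
  unfold checkedFragsA fragsB
  apply PySem.List.foldl_congr_mem
  intro acc tok _
  show scLoopA acc tok [".", ",", "!", "?"] = _
  simp only [scLoopA]
  by_cases h : PySem.Chars.isIn ['.'] tok.toList = true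
  · have hf : (0:Int) ≤ PySem.Chars.find tok.toList ['.'] := by
      rw [PySem.Chars.find_nonneg_iff]
      exact (PySem.Chars.isIn_iff_infix _ _).mp h
    simp [h, hf]
  · have hf : ¬ (0:Int) ≤ PySem.Chars.find tok.toList ['.'] := by
      rw [PySem.Chars.find_nonneg_iff]
      intro hc
      exact h ((PySem.Chars.isIn_iff_infix _ _).mpr hc)
    simp [h, hf]

-- sequential form of consumeA
def consumeL (w : String) : List String → List String × List String
  | [] => ([], [])
  | fr :: l =>
    if PySem.Str.slice w (some (-(PySem.Str.len fr : Int))) none == fr then ([fr], l)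
    else
      let r := consumeL w l
      (fr :: r.1, r.2)

lemma consumeA_eq_consumeL (frs : List String) (w : String) :
    ∀ c, consumeA frs w c = ((consumeL w (frs.drop c)).1, c + (consumeL w (frs.drop c)).1.length)
        ∧ frs.drop (c + (consumeL w (frs.drop c)).1.length) = (consumeL w (frs.drop c)).2 := by
  intro c
  induction' hn : frs.length - c using Nat.strong_induction_on with n ih generalizing c
  by_cases h : c < frs.length
  · have hdrop : frs.drop c = frs[c] :: frs.drop (c + 1) :=
      List.drop_eq_getElem_cons h
    rw [consumeA, dif_pos h, hdrop]
    simp only [consumeL]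
    by_cases hm : PySem.Str.slice w (some (-(PySem.Str.len frs[c] : Int))) none == frs[c]
    · simp only [if_pos hm]
      constructor <;> simp
    · simp only [if_neg hm, List.length_cons]
      have hrec := ih (frs.length - (c + 1)) (by omega) (c + 1) rfl
      rw [hrec.1]
      constructor
      · congr 1
        omega
      · rw [show c + ((consumeL w (frs.drop (c + 1))).1.length + 1)
              = c + 1 + (consumeL w (frs.drop (c + 1))).1.length by omega]
        exact hrec.2
  · have hdrop : frs.drop c = [] := List.drop_eq_nil_of_le (by omega)
    rw [consumeA, dif_neg h, hdrop]
    simp [consumeL, hdrop]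

-- feedB on a cons with a positive pointer just skips the head
lemma feedB_succ (l : List String) : ∀ (k : Nat) (x : List String) (rest : List (List String)),
    feedB (x :: rest) (k + 1) l = x :: feedB rest k l := by
  induction l with
  | nil => intro k x rest; rfl
  | cons fr l ih =>
    intro k x rest
    by_cases h : k < rest.length
    · rw [feedB, dif_pos (by simpa using Nat.succ_lt_succ h)]
      simp only [List.getElem_cons_succ, List.set_cons_succ]
      rw [feedB, dif_pos h]
      split
      · exact ih (k + 1) x _
      · exact ih k x _
    · rw [feedB, dif_neg (by simpa using fun hh => h (Nat.lt_of_succ_lt_succ hh)),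
          feedB, dif_neg h]

-- feeding the first word: feedB at pointer 0 splits as consumeL on the head word
lemma feedB_zero (word : List String) (hw : word ≠ []) :
    ∀ (l : List String) (pending : List String) (rest : List (List String)),
      feedB ((word ++ pending) :: rest) 0 l
        = (word ++ pending ++ (consumeL (word.headD "") l).1) :: feedB rest 0 (consumeL (word.headD "") l).2 := by
  intro l
  induction l with
  | nil =>
    intro pending rest
    simp only [consumeL]
    cases rest <;> simp [feedB]
  | cons fr l ih =>
    intro pending rest
    rw [feedB, dif_pos (by simp)]
    simp only [List.getElem_cons_zero, List.set_cons_zero]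
    have hhead : ((word ++ pending) ++ [fr]).headD "" = word.headD "" := by
      cases word with
      | nil => exact absurd rfl hw
      | cons a t => simp
    simp only [consumeL]
    by_cases hm : PySem.Str.slice (word.headD "") (some (-(PySem.Str.len fr : Int))) none == fr
    · rw [if_pos (by rw [hhead]; exact hm), if_pos hm]
      rw [feedB_succ]
    · rw [if_neg (by rw [hhead]; exact hm), if_neg hm]
      have := ih (pending ++ [fr]) rest
      simp only [← List.append_assoc] at this ⊢
      rw [this]
      simp

-- the word loop of A equals B's fragment feed
lemma wordsLoopA_eq_feedB (enc : String) :
    ∀ (ws : List (List String)) (c : Nat), (∀ w ∈ ws, w ≠ []) →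
      wordsLoopA enc ws c = feedB ws 0 ((fragsB (PySem.Str.split₀ enc)).drop c) := by
  intro ws
  induction ws with
  | nil =>
    intro c _
    cases h : (fragsB (PySem.Str.split₀ enc)).drop c <;> simp [wordsLoopA, feedB]
  | cons word rest ih =>
    intro c hne
    have hw : word ≠ [] := hne word (by simp)
    rw [wordsLoopA]
    simp only [checkedFrags_eq_fragsB]
    set frs := fragsB (PySem.Str.split₀ enc) with hfrs
    have hc := consumeA_eq_consumeL frs (word.headD "") c
    rw [hc.1]
    have hrest : wordsLoopA enc rest (c + (consumeL (word.headD "") (frs.drop c)).1.length)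
        = feedB rest 0 ((consumeL (word.headD "") (frs.drop c)).2) := by
      rw [ih _ (fun w hw => hne w (by simp [hw])), hc.2]
    rw [hrest]
    have := feedB_zero word hw (frs.drop c) [] rest
    simpa using this.symm

-- ===== VERDICT (by name: the statement is the Claim_ definition above) =====
theorem words2fragments_spec : Claim_equal_words2fragments := by
  intro dataset encoded _ hpre
  unfold Spec_words2fragments words2fragments words2fragments_alt
  obtain ⟨hwords, _⟩ := hpre
  have : ∀ (ds : List (List (List String))) (i : Nat), (∀ s ∈ ds, ∀ w ∈ s, w ≠ []) →
      sentLoopA encoded ds i = (ds.zipIdx i).map (fun p =>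
        if p.1.isEmpty then p.1
        else feedB p.1 0 (fragsB (PySem.Str.split₀ (encoded.getD p.2 "")))) := by
    intro ds
    induction ds with
    | nil => intro i _; rfl
    | cons s rest ih =>
      intro i h
      rw [sentLoopA, List.zipIdx_cons, List.map_cons]
      congr 1
      · by_cases hs : s.isEmpty
        · have : s = [] := by simpa using hs
          simp [this, wordsLoopA]
        · rw [if_neg hs]
          simpa using wordsLoopA_eq_feedB (encoded.getD i "") s 0 (h s (by simp))
      · exact ih (i + 1) (fun s' hs' => h s' (by simp [hs']))
  exact this dataset 0 hwords
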